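-- pv_equiv track=rewrite | github.com/daniel880423/Member_System | file/hw2/1100413/s1100413_0.py | homework_2
-- ===== SOURCE A (Python) =====
-- def homework_2(lst): # 請同學記得把檔案名稱改成自己的學號(ex.1104813.py)
--     lenlst = len(lst)
--     lst.append(None)
--     count = 0
--     for i in range(lenlst):
--         if lst[i]%2 !=0:
--             lst[i]= lst[i]+1
--             count+=1
--
--         else:
--             continue
--     for i in range(lenlst):
--         if i == lenlst-1:
--             break
--
--         if lst[i]>lst[i+1]:
--             lst[i+1]=lst[i]+2
--             count = count+lst[i]
--
--         if lst[i]==lst[i+1]: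
--             lst[i+1]+=2
--             count+=2
--         if lst[i]<lst[i+1]:
--             continue
--
--     return count
-- ===== SOURCE B (Python) =====
-- def homework_2(lst):
--     # Single fused pass carrying only (prev, count); A's append(None) side effect
--     # is preserved, but A's in-place element rewrites are not replicated.
--     lenlst = len(lst)
--     lst.append(None)
--     prev = None
--     count = 0
--     for x in lst[:lenlst]:
--         cur = x
--         if x % 2 != 0:
--             cur = x + 1
--             count += 1
--         if prev is not None:
--             if prev > cur:
--                 cur = prev + 2
--                 count += prev
--             elif prev == cur:
--                 cur = cur + 2
--                 count += 2
--         prev = cur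
--     return count
-- ===== Notes on version B (the rewrite author's own statement) =====
-- stated objective: alternative
-- what changed: B fuses A's two sequential passes (odd-fix pass, then adjacent-compare pass with index arithmetic into the mutated list) into a single pass over the values carrying only (prev, count), with no indexing and no element rewrites.
import Mathlib
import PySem

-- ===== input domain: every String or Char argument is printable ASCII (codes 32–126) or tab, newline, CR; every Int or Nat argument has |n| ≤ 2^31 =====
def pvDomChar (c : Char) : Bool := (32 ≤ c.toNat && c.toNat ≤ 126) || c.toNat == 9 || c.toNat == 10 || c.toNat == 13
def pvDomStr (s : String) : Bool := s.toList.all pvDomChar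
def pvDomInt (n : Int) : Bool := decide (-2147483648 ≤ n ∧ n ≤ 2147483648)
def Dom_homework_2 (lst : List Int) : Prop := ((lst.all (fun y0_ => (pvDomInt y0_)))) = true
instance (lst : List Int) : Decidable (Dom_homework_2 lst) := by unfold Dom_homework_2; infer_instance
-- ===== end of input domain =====

-- B fuses A's two passes into one, carrying only (prev, count) instead of re-indexing the list.
-- A mutates its argument (append(None) + element rewrites); the equivalence here is about the RETURN value only.

-- ===== PORT A =====
-- body of A's first loop (odd-fix at index i)
def pass1Step (st : List Int × Int) (i : Nat) : List Int × Int :=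
  let l := st.1; let c := st.2
  if l.getD i 0 % 2 ≠ 0 then (l.set i (l.getD i 0 + 1), c + 1) else (l, c)

-- body of A's second loop at index i (the `continue` branch is a no-op),
-- as the two sequential if-statements of the Python body
def pass2StepGT (st : List Int × Int) (i : Nat) : List Int × Int :=
  if st.1.getD i 0 > st.1.getD (i+1) 0 then
    let l1 := st.1.set (i+1) (st.1.getD i 0 + 2)
    (l1, st.2 + l1.getD i 0)
  else st

def pass2StepEQ (st : List Int × Int) (i : Nat) : List Int × Int :=
  if st.1.getD i 0 = st.1.getD (i+1) 0 then
    (st.1.set (i+1) (st.1.getD (i+1) 0 + 2), st.2 + 2)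
  else st

def pass2Step (st : List Int × Int) (i : Nat) : List Int × Int :=
  pass2StepEQ (pass2StepGT st i) i

-- A's second loop including the `break` at i == lenlst-1, as a stopped flag
def pass2FlagStep (lenlst : Nat) (st : List Int × Int × Bool) (i : Nat) : List Int × Int × Bool :=
  if st.2.2 then st
  else if i = lenlst - 1 then (st.1, st.2.1, true)
  else
    let r := pass2Step (st.1, st.2.1) i
    (r.1, r.2, false)

-- A: lst.append(None) appends a sentinel the loops never read; the return-value port omits it
def homework_2 (lst : List Int) : Int :=
  let lenlst := lst.length
  let s1 := (List.range lenlst).foldl pass1Step (lst, 0)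
  let s2 := (List.range lenlst).foldl (pass2FlagStep lenlst) (s1.1, s1.2, false)
  s2.2.1

-- ===== PORT B =====
def altStep (st : Option Int × Int) (x : Int) : Option Int × Int :=
  let cur := if x % 2 ≠ 0 then x + 1 else x
  let c := if x % 2 ≠ 0 then st.2 + 1 else st.2
  match st.1 with
  | none => (some cur, c)
  | some prev =>
    if prev > cur then (some (prev + 2), c + prev)
    else if prev = cur then (some (cur + 2), c + 2)
    else (some cur, c)

def homework_2_alt (lst : List Int) : Int := (lst.foldl altStep (none, 0)).2

-- ===== PRECONDITION & SPEC =====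
def Spec_homework_2 (lst : List Int) (out : Int) : Prop := out = homework_2_alt lst
instance (lst : List Int) (out : Int) : Decidable (Spec_homework_2 lst out) := by unfold Spec_homework_2; infer_instance

-- ===== CLAIM (what is proved, stated in full; the proofs are below) =====
def Claim_equal_homework_2 : Prop := ∀ (lst : List Int), Dom_homework_2 lst → Spec_homework_2 lst (homework_2 lst)

-- ===== LEMMAS AND PROOFS =====

-- odd-fix of one element, and the count of odd elements
def oddFix (x : Int) : Int := if x % 2 ≠ 0 then x + 1 else x
def oddC (x : Int) : Int := if x % 2 ≠ 0 then 1 else 0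
def countOdds : List Int → Int
  | [] => 0
  | x :: t => oddC x + countOdds t

-- the count contributed by A's second pass, as a scan carrying the previous value
def spec2 : Int → List Int → Int
  | _, [] => 0
  | prev, x :: t =>
    if prev > x then prev + spec2 (prev + 2) t
    else if prev = x then 2 + spec2 (x + 2) t
    else spec2 x t

theorem pass1Step_cons (a : Int) (l : List Int) (c : Int) (i : Nat) :
    pass1Step (a :: l, c) (i + 1) = ((pass1Step (l, c) i).1.cons a, (pass1Step (l, c) i).2) := by
  simp [pass1Step]
  split_ifs <;> simp

theorem foldl_pass1_cons (a : Int) (is : List Nat) : ∀ (l : List Int) (c : Int),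
    List.foldl pass1Step (a :: l, c) (is.map Nat.succ)
      = ((List.foldl pass1Step (l, c) is).1.cons a, (List.foldl pass1Step (l, c) is).2) := by
  induction is with
  | nil => intro l c; rfl
  | cons i is ih =>
      intro l c
      simp only [List.map_cons, List.foldl_cons, Nat.succ_eq_add_one, pass1Step_cons]
      rw [ih]

theorem pass1_main : ∀ (l : List Int) (c : Int),
    List.foldl pass1Step (l, c) (List.range l.length) = (l.map oddFix, c + countOdds l) := by
  intro l
  induction l with
  | nil => intro c; simp [countOdds]
  | cons x t ih =>
      intro c
      rw [List.length_cons, List.range_succ_eq_map, List.foldl_cons]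
      have h0 : pass1Step (x :: t, c) 0 = (oddFix x :: t, c + oddC x) := by
        simp [pass1Step, oddFix, oddC]
        split_ifs <;> simp
      rw [h0, foldl_pass1_cons, ih]
      simp [countOdds, add_assoc]

theorem pass2StepGT_cons (a : Int) (l : List Int) (c : Int) (i : Nat) :
    pass2StepGT (a :: l, c) (i + 1) = ((pass2StepGT (l, c) i).1.cons a, (pass2StepGT (l, c) i).2) := by
  unfold pass2StepGT
  simp only [List.getD_cons_succ, List.set_cons_succ]
  split_ifs <;> rfl

theorem pass2StepEQ_cons (a : Int) (l : List Int) (c : Int) (i : Nat) :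
    pass2StepEQ (a :: l, c) (i + 1) = ((pass2StepEQ (l, c) i).1.cons a, (pass2StepEQ (l, c) i).2) := by
  unfold pass2StepEQ
  simp only [List.getD_cons_succ, List.set_cons_succ]
  split_ifs <;> rfl

theorem pass2Step_cons (a : Int) (l : List Int) (c : Int) (i : Nat) :
    pass2Step (a :: l, c) (i + 1) = ((pass2Step (l, c) i).1.cons a, (pass2Step (l, c) i).2) := by
  unfold pass2Step
  rw [pass2StepGT_cons]
  have : ((pass2StepGT (l, c) i).1.cons a, (pass2StepGT (l, c) i).2)
      = (((pass2StepGT (l, c) i).1, (pass2StepGT (l, c) i).2).1.cons a,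
         ((pass2StepGT (l, c) i).1, (pass2StepGT (l, c) i).2).2) := rfl
  rw [this, pass2StepEQ_cons]

theorem foldl_pass2_cons (a : Int) (is : List Nat) : ∀ (l : List Int) (c : Int),
    List.foldl pass2Step (a :: l, c) (is.map Nat.succ)
      = ((List.foldl pass2Step (l, c) is).1.cons a, (List.foldl pass2Step (l, c) is).2) := by
  induction is with
  | nil => intro l c; rfl
  | cons i is ih =>
      intro l c
      simp only [List.map_cons, List.foldl_cons, Nat.succ_eq_add_one, pass2Step_cons]
      rw [ih]

theorem pass2_main : ∀ (t : List Int) (prev c : Int),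
    (List.foldl pass2Step (prev :: t, c) (List.range t.length)).2 = c + spec2 prev t := by
  intro t
  induction t with
  | nil => intro prev c; simp [spec2]
  | cons x t ih =>
      intro prev c
      rw [List.length_cons, List.range_succ_eq_map, List.foldl_cons]
      by_cases hgt : prev > x
      · have h0 : pass2Step (prev :: x :: t, c) 0 = (prev :: (prev + 2) :: t, c + prev) := by
          simp [pass2Step, pass2StepGT, pass2StepEQ, hgt]
        rw [h0, foldl_pass2_cons, ih]
        simp [spec2, hgt, add_assoc]
      · by_cases heq : prev = x
        · have h0 : pass2Step (prev :: x :: t, c) 0 = (prev :: (x + 2) :: t, c + 2) := by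
            simp [pass2Step, pass2StepGT, pass2StepEQ, hgt, heq]
          rw [h0, foldl_pass2_cons, ih]
          simp [spec2, hgt, heq, add_assoc]
        · have h0 : pass2Step (prev :: x :: t, c) 0 = (prev :: x :: t, c) := by
            simp [pass2Step, pass2StepGT, pass2StepEQ, hgt, heq]
          rw [h0, foldl_pass2_cons, ih]
          have hlt : ¬ prev > x := hgt
          simp [spec2, hlt, heq]

theorem flag_elim (n : Nat) (is : List Nat) : ∀ (l : List Int) (c : Int),
    (∀ i ∈ is, i ≠ n - 1) →
    List.foldl (pass2FlagStep n) (l, c, false) is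
      = ((List.foldl pass2Step (l, c) is).1, (List.foldl pass2Step (l, c) is).2, false) := by
  induction is with
  | nil => intro l c _; rfl
  | cons i is ih =>
      intro l c h
      have hi : i ≠ n - 1 := h i (by simp)
      simp only [List.foldl_cons]
      have hs : pass2FlagStep n (l, c, false) i
          = ((pass2Step (l, c) i).1, (pass2Step (l, c) i).2, false) := by
        simp [pass2FlagStep, hi]
      rw [hs]
      exact ih _ _ (fun j hj => h j (by simp [hj]))

theorem snd_flag_fold (n : Nat) (l : List Int) (c : Int) :
    (List.foldl (pass2FlagStep (n+1)) (l, c, false) (List.range (n+1))).2.1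
      = (List.foldl pass2Step (l, c) (List.range n)).2 := by
  rw [List.range_succ, List.foldl_append]
  rw [flag_elim (n+1) (List.range n) l c (by intro i hi; simp at hi; omega)]
  simp [pass2FlagStep]

theorem alt_fold : ∀ (t : List Int) (prev c : Int),
    (List.foldl altStep (some prev, c) t).2 = c + countOdds t + spec2 prev (t.map oddFix) := by
  intro t
  induction t with
  | nil => intro prev c; simp [countOdds, spec2]
  | cons x t ih =>
      intro prev c
      simp only [List.foldl_cons, List.map_cons]
      by_cases hodd : x % 2 ≠ 0
      · by_cases hgt : prev > oddFix x
        · have : altStep (some prev, c) x = (some (prev + 2), c + 1 + prev) := by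
            simp [altStep, oddFix, hodd, hgt] at *; simp_all [oddFix, hodd]
          rw [this, ih]
          simp [countOdds, spec2, hgt, oddC, hodd]; ring
        · by_cases heq : prev = oddFix x
          · have : altStep (some prev, c) x = (some (oddFix x + 2), c + 1 + 2) := by
              simp [altStep, oddFix, hodd] at *; simp_all [oddFix, hodd]
            rw [this, ih]
            simp [countOdds, spec2, hgt, heq, oddC, hodd]; ring
          · have : altStep (some prev, c) x = (some (oddFix x), c + 1) := by
              simp [altStep, oddFix, hodd] at *; simp_all [oddFix, hodd]
            rw [this, ih]
            simp [countOdds, spec2, hgt, heq, oddC, hodd]; ring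
      · by_cases hgt : prev > oddFix x
        · have : altStep (some prev, c) x = (some (prev + 2), c + prev) := by
            simp [altStep, oddFix, hodd] at *; simp_all [oddFix, hodd]
          rw [this, ih]
          simp [countOdds, spec2, hgt, oddC, hodd]; ring
        · by_cases heq : prev = oddFix x
          · have : altStep (some prev, c) x = (some (oddFix x + 2), c + 2) := by
              simp [altStep, oddFix, hodd] at *; simp_all [oddFix, hodd]
            rw [this, ih]
            simp [countOdds, spec2, hgt, heq, oddC, hodd]; ring
          · have : altStep (some prev, c) x = (some (oddFix x), c) := by
              simp [altStep, oddFix, hodd] at *; simp_all [oddFix, hodd]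
            rw [this, ih]
            simp [countOdds, spec2, hgt, heq, oddC, hodd]

-- ===== VERDICT (by name: the statement is the Claim_ definition above) =====
theorem homework_2_spec : Claim_equal_homework_2 := by
  intro lst _
  unfold Spec_homework_2 homework_2 homework_2_alt
  cases lst with
  | nil => rfl
  | cons x t =>
      simp only [List.length_cons]
      have hA1 : List.foldl pass1Step (x :: t, 0) (List.range (t.length + 1))
          = ((x :: t).map oddFix, 0 + countOdds (x :: t)) := by
        simpa using pass1_main (x :: t) 0
      rw [hA1]
      simp only [List.map_cons]
      rw [snd_flag_fold]
      have hp2 : (List.foldl pass2Step (oddFix x :: t.map oddFix, 0 + countOdds (x :: t))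
            (List.range t.length)).2
          = 0 + countOdds (x :: t) + spec2 (oddFix x) (t.map oddFix) := by
        have := pass2_main (t.map oddFix) (oddFix x) (0 + countOdds (x :: t))
        simpa using this
      rw [hp2]
      have hB : (List.foldl altStep (none, 0) (x :: t)).2
          = oddC x + countOdds t + spec2 (oddFix x) (t.map oddFix) := by
        have h0 : altStep ((none : Option Int), (0 : Int)) x = (some (oddFix x), oddC x) := by
          simp [altStep, oddFix, oddC]
        simp only [List.foldl_cons, h0]
        rw [alt_fold]
      rw [hB]
      simp [countOdds]
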